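-- pv_equiv track=rewrite | github.com/christianebacani/Roadmap | Coding Challenges using Python and SQL/LeetCode Python Solved Problems/Easy Level/calculate_digit_sum_of_a_string.py | digitSum
-- ===== SOURCE A (Python) =====
-- def digitSum(s: str, k: int) -> str:
--     while len(s) > k:
--         sum_digits = ''
--
--         for i in range(0, len(s), k):
--             sum = 0
--
--             for j in range(len(s[i:i + k])):
--                 sum += int(s[i:i + k][j])
--
--             sum_digits += str(sum)
--
--         s = sum_digits
--
--     return s
-- ===== SOURCE B (Python) =====
-- def digitSum(s: str, k: int) -> str:
--     if len(s) <= k: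
--         return s
--     chunks = []
--     rest = s
--     while rest:
--         chunks.append(rest[:k])
--         rest = rest[k:]
--     nxt = ''.join(str(sum(int(c) for c in chunk)) for chunk in chunks)
--     return digitSum(nxt, k)
-- ===== Notes on version B (the rewrite author's own statement) =====
-- stated objective: alternative
-- what changed: The per-round work is restructured from index arithmetic with repeated re-slicing (s[i:i+k] rebuilt for every inner j) into a single take/drop chunking pass whose chunk sums are joined, and the outer while-loop fixed point is driven by recursion instead of iteration.
import Mathlib
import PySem

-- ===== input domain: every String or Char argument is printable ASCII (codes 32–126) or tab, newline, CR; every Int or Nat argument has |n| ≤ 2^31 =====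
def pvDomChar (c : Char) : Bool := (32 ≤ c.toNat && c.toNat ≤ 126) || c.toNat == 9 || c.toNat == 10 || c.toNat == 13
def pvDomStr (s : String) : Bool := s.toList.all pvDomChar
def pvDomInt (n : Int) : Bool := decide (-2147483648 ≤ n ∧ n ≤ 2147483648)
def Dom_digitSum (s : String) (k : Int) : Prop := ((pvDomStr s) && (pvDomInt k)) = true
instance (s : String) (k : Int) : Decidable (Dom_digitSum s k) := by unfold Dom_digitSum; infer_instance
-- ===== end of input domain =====

-- B replaces A's index/slice round (which re-slices s[i:i+k] for every j) by a single
-- take/drop chunking pass joined per-chunk, and drives the while-loop fixed point recursively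
-- (objective: alternative decomposition; return values proved equal on Pre_).

-- ===== PORT A =====
-- int(<one-character string>); the `.getD 0` is a totality guard only: Python raises
-- ValueError on a non-digit char, which Pre_digitSum excludes.
def pvIntChar (c : Char) : Int := (PySem.Int.ofChars? [c]).getD 0

-- one pass of A's while-body, over List Char (sum_digits accumulator, chunk re-sliced per j as in A)
def pvRoundA (l : List Char) (k : Int) : List Char :=
  (PySem.List.pyRange 0 (l.length : Int) k).foldl (fun sum_digits i =>
    sum_digits ++ PySem.Int.toChars
      ((PySem.List.pyRange 0 ((PySem.List.slice l (some i) (some (i + k))).length : Int) 1).foldl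
        (fun sum j => sum + pvIntChar (PySem.List.pyGetD (PySem.List.slice l (some i) (some (i + k))) j ' ')) 0)) []

-- fuel is a totality guard only: on Pre_ inputs the loop strictly decreases the lexicographic
-- measure (total digit sum, length), so it runs at most (9n+1)(n+1) < pvFuel rounds.
def pvFuel (l : List Char) : Nat := 10 * (l.length + 1) * (l.length + 1)

def pvLoopA : Nat → List Char → Int → List Char
  | 0, l, _ => l
  | f + 1, l, k => if k < (l.length : Int) then pvLoopA f (pvRoundA l k) k else l

def digitSum (s : String) (k : Int) : String :=
  String.ofList (pvLoopA (pvFuel s.toList) s.toList k)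

-- ===== PORT B =====
-- Source B's chunking loop `while rest: chunks.append(rest[:k]); rest = rest[k:]`;
-- rest[:k]/rest[k:] are take/drop for k ≥ 1; the `1 ≤ k` guard is for totality only
-- (Python loops forever there; Pre_digitSum guarantees 2 ≤ k whenever chunking runs).
def pvChunksB (k : Int) (l : List Char) : List (List Char) :=
  if l = [] then []
  else if 1 ≤ k then
    l.take k.toNat :: pvChunksB k (l.drop k.toNat)
  else []
termination_by l.length
decreasing_by
  rename_i h1 h2
  have hl : l.length ≠ 0 := by simpa using (List.length_eq_zero_iff.not.mpr h1)
  simp [List.length_drop]; omega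

-- ''.join(str(sum(int(c) for c in chunk)) for chunk in chunks)
def pvRoundB (l : List Char) (k : Int) : List Char :=
  ((pvChunksB k l).map (fun chunk =>
    PySem.Int.toChars (chunk.foldl (fun a c => a + pvIntChar c) 0))).flatten

-- Source B's recursion `if len(s) <= k: return s; return digitSum(round(s), k)`, fuel as totality guard
def pvGoB : Nat → List Char → Int → List Char
  | 0, l, _ => l
  | f + 1, l, k => if (l.length : Int) ≤ k then l else pvGoB f (pvRoundB l k) k

def digitSum_alt (s : String) (k : Int) : String :=
  String.ofList (pvGoB (pvFuel s.toList) s.toList k)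

-- ===== PRECONDITION & SPEC =====
-- Pre_ excludes exactly the inputs where Python A does not return: when len(s) > k the loop body
-- runs, so int(c) raises ValueError on any non-digit char, range step k ≤ 0 raises or the loop
-- never terminates, and k = 1 never shrinks the string (infinite loop).
def Pre_digitSum (s : String) (k : Int) : Prop :=
  ((s.length : Int) ≤ k) ∨ (2 ≤ k ∧ s.toList.all (fun c => c.isDigit) = true)
instance (s : String) (k : Int) : Decidable (Pre_digitSum s k) := by unfold Pre_digitSum; infer_instance

def pvWitness_digitSum : String × Int := ("1234", 2)

def Spec_digitSum (s : String) (k : Int) (out : String) : Prop := out = digitSum_alt s k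
instance (s : String) (k : Int) (out : String) : Decidable (Spec_digitSum s k out) := by unfold Spec_digitSum; infer_instance

-- ===== CLAIM (what is proved, stated in full; the proofs are below) =====
def Claim_equal_digitSum : Prop := ∀ (s : String) (k : Int), Dom_digitSum s k → Pre_digitSum s k → Spec_digitSum s k (digitSum s k)

-- ===== LEMMAS AND PROOFS =====

-- pyRange with nonpositive step and nonnegative stop is empty
theorem pvPyRange_nonpos (n k : Int) (hn : 0 ≤ n) (hk : k ≤ 0) :
    PySem.List.pyRange 0 n k = [] := by
  unfold PySem.List.pyRange
  split_ifs with h1 h2 h3 <;> first | rfl | omega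

-- the Int chunk count equals the Nat ceiling count
theorem pvCount (n m : Nat) (hn : 1 ≤ n) (hm : 1 ≤ m) :
    (((n : Int) + (m : Int) - 1) / (m : Int)).toNat = (n - 1) / m + 1 := by
  have h1 : ((n : Int) + (m : Int) - 1) = (((n - 1) + m : Nat) : Int) := by push_cast; omega
  rw [h1, ← Int.natCast_div, Int.toNat_natCast, Nat.add_div_right _ (by omega : 0 < m)]

-- a slice step of A in drop/take form
theorem pvSlice_mul (l : List Char) (m j : Nat) :
    PySem.List.slice l (some (0 + (m:Int) * (j:Int))) (some (0 + (m:Int) * (j:Int) + (m:Int)))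
      = (l.drop (m*j)).take m := by
  rw [show (0 + (m:Int)*(j:Int)) = ((m*j : Nat):Int) by push_cast; ring]
  rw [show (((m*j : Nat):Int) + (m:Int)) = ((m*j + m : Nat):Int) by push_cast; ring]
  rw [PySem.List.slice_natCast]
  congr 1
  omega

-- A's slice enumeration in closed chunk form
theorem pvMapChunks (m : Nat) (hm : 1 ≤ m) (l : List Char) (h1 : 1 ≤ l.length) :
    (PySem.List.pyRange 0 (l.length : Int) (m : Int)).map
        (fun i => PySem.List.slice l (some i) (some (i + (m : Int))))
      = (List.range ((l.length - 1)/m + 1)).map (fun j => (l.drop (m*j)).take m) := by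
  have hm' : (0 : Int) < (m : Int) := by exact_mod_cast hm
  rw [PySem.List.pyRange_of_pos 0 (l.length : Int) hm']
  rw [if_pos (by exact_mod_cast h1 : (0:Int) < (l.length : Int))]
  rw [show ((l.length : Int) - 0 + (m:Int) - 1) = ((l.length : Int) + (m:Int) - 1) by ring]
  rw [pvCount l.length m h1 hm, List.map_map]
  exact List.map_congr_left (fun j _ => pvSlice_mul l m j)

-- chunk slices of l listed by pyRange equal pvChunksB
theorem pvChunks_eq (m : Nat) (hm : 1 ≤ m) (l : List Char) :
    (PySem.List.pyRange 0 (l.length : Int) (m : Int)).map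
      (fun i => PySem.List.slice l (some i) (some (i + (m : Int)))) = pvChunksB (m : Int) l := by
  have hm' : (0 : Int) < (m : Int) := by exact_mod_cast hm
  by_cases hnil : l = []
  · subst hnil
    rw [pvChunksB]
    simp [PySem.List.pyRange_of_pos 0 0 hm']
  · have hlen : 1 ≤ l.length := List.length_pos_iff.mpr hnil
    rw [pvMapChunks m hm l hlen]
    rw [pvChunksB, if_neg hnil, if_pos (by exact_mod_cast hm : (1:Int) ≤ (m:Int)), Int.toNat_natCast]
    rw [List.range_succ_eq_map, List.map_cons, List.map_map]
    congr 1
    by_cases hle : l.length ≤ m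
    · have hd : l.drop m = [] := List.drop_eq_nil_of_le (by omega)
      have hc : (l.length - 1) / m = 0 := Nat.div_eq_of_lt (by omega)
      rw [hc, hd, pvChunksB]
      simp
    · have IH := pvChunks_eq m hm (l.drop m)
      have hd1 : 1 ≤ (l.drop m).length := by simp; omega
      rw [pvMapChunks m hm _ hd1, List.length_drop] at IH
      have hcc : (l.length - 1) / m = (l.length - m - 1) / m + 1 := by
        rw [show l.length - 1 = (l.length - m - 1) + m by omega,
            Nat.add_div_right _ (by omega : 0 < m)]
      rw [hcc, ← IH]
      apply List.map_congr_left
      intro j _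
      show ((l.drop (m * (j+1))).take m) = (((l.drop m).drop (m*j)).take m)
      rw [List.drop_drop]
      congr 2
      ring
termination_by l.length
decreasing_by simp; omega

-- one round of A equals one round of B
theorem pvRound_eq (l : List Char) (k : Int) : pvRoundA l k = pvRoundB l k := by
  unfold pvRoundA pvRoundB
  have hfun : ∀ xs : List Char,
      (PySem.List.pyRange 0 (xs.length : Int) 1).foldl
        (fun sum j => sum + pvIntChar (PySem.List.pyGetD xs j ' ')) 0
        = xs.foldl (fun a c => a + pvIntChar c) 0 :=
    fun xs => PySem.List.foldl_pyRange_zero_pyGetD' xs ' ' (fun a c => a + pvIntChar c) 0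
  by_cases hk : 1 ≤ k
  · have hk' : k = (k.toNat : Int) := (Int.toNat_of_nonneg (by omega)).symm
    rw [hk']
    simp only [hfun]
    rw [PySem.List.foldl_append_eq_flatMap, List.nil_append,
        ← List.flatMap_def, ← pvChunks_eq k.toNat (by omega) l, List.flatMap_map]
  · rw [pvPyRange_nonpos _ k (Int.natCast_nonneg _) (by omega), pvChunksB]
    split_ifs <;> rfl

-- the two drivers agree for every fuel value
theorem pvLoop_eq (f : Nat) (l : List Char) (k : Int) : pvLoopA f l k = pvGoB f l k := by
  induction f generalizing l with
  | zero => rfl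
  | succ f ih =>
    simp only [pvLoopA, pvGoB]
    by_cases h : (l.length : Int) ≤ k
    · simp [h, not_lt.mpr h]
    · simp [h, lt_of_not_ge h, ih, pvRound_eq]

-- ===== VERDICT (by name: the statement is the Claim_ definition above) =====
theorem digitSum_spec : Claim_equal_digitSum := by
  intro s k _ _
  unfold Spec_digitSum digitSum digitSum_alt
  rw [pvLoop_eq]
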